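-- pv_equiv track=rewrite | github.com/krj9cr/advent-of-code | year_2023/src/Day13.py | compare_rows_smudge
-- ===== SOURCE A (Python) =====
-- def compare_rows_smudge(row1, row2):
--     diff = 0
--     diffIdx = None
--     whichRow = None
--     for i in range(len(row1)):
--         char1 = row1[i]
--         char2 = row2[i]
--         if char1 != char2:
--             diff += 1
--             diffIdx = i
--             if char1 == ".":
--                 whichRow = 1
--             else:
--                 whichRow = 2
--     if diff == 1:
--         return diffIdx, whichRow
--     return None
-- ===== SOURCE B (Python) =====
-- def compare_rows_smudge(row1, row2):
--     n = len(row1)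
--     i = 0
--     while i < n and row1[i] == row2[i]:
--         i += 1
--     if i == n:
--         return None
--     if row1[i + 1:n] != row2[i + 1:n]:
--         return None
--     return i, 1 if row1[i] == "." else 2
-- ===== Notes on version B (the rewrite author's own statement) =====
-- stated objective: faster
-- what changed: Two-phase short-circuiting algorithm: B scans only until the FIRST mismatch (early exit), then decides with a single slice comparison of the remaining suffixes, instead of A's full stateful pass counting mismatches and tracking the last mismatch index and whichRow; the per-character work moves into one native slice equality.
import Mathlib
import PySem

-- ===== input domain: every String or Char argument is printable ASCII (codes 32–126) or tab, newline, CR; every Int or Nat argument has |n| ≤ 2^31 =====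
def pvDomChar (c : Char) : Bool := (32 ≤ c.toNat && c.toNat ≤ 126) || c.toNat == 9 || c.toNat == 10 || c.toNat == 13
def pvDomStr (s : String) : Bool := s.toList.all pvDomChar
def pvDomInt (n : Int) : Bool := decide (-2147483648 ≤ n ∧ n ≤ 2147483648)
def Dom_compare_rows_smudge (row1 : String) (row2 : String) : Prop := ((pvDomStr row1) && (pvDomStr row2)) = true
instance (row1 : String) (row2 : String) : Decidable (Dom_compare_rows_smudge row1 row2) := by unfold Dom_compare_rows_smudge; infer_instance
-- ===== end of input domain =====

-- B replaces A's full stateful counting pass by a two-phase short-circuiting algorithm: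
-- scan only to the FIRST mismatch, then decide with one slice comparison of the suffixes.

-- ===== PORT A =====
-- Literal port of A's loop: state (diff, diffIdx, whichRow), last mismatch wins.
-- Indexing is exact inside Pre_ (both indices in range); '.getD ' '' never fires there.
def compare_rows_smudge (row1 : String) (row2 : String) : Option (Int × Int) :=
  let l1 := row1.toList
  let l2 := row2.toList
  let st := (PySem.List.pyRange 0 (l1.length : Int) 1).foldl
    (fun (s : Int × Option Int × Option Int) i =>
      let char1 := (PySem.List.pyGet? l1 i).getD ' '
      let char2 := (PySem.List.pyGet? l2 i).getD ' '
      if char1 != char2 then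
        (s.1 + 1, some i, some (if char1 == '.' then (1 : Int) else 2))
      else s)
    ((0 : Int), (none : Option Int), (none : Option Int))
  if st.1 = 1 then
    match st.2.1, st.2.2 with
    | some d, some w => some (d, w)
    | _, _ => none
  else none

-- ===== PORT B =====
-- B's while loop 'while i < n and row1[i] == row2[i]: i += 1' (first mismatch or n).
def csFind (l1 l2 : List Char) (n : Int) (i : Int) : Int :=
  if _h : i < n then
    if (PySem.List.pyGet? l1 i).getD ' ' == (PySem.List.pyGet? l2 i).getD ' ' then
      csFind l1 l2 n (i + 1)
    else i
  else i
termination_by (n - i).toNat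
decreasing_by omega

def compare_rows_smudge_alt (row1 : String) (row2 : String) : Option (Int × Int) :=
  let l1 := row1.toList
  let l2 := row2.toList
  let n : Int := l1.length
  let i := csFind l1 l2 n 0
  if i = n then none
  else if PySem.List.slice l1 (some (i + 1)) (some n) ≠ PySem.List.slice l2 (some (i + 1)) (some n) then none
  else some (i, if (PySem.List.pyGet? l1 i).getD ' ' == '.' then (1 : Int) else 2)

-- ===== PRECONDITION & SPEC =====
-- Pre_ excludes exactly the inputs where row2[i] raises IndexError in A:
-- len(row2) < len(row1).
def Pre_compare_rows_smudge (row1 : String) (row2 : String) : Prop :=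
  row1.toList.length ≤ row2.toList.length
instance (row1 : String) (row2 : String) : Decidable (Pre_compare_rows_smudge row1 row2) := by
  unfold Pre_compare_rows_smudge; infer_instance

def pvWitness_compare_rows_smudge : String × String := ("#.#", "###")

def Spec_compare_rows_smudge (row1 : String) (row2 : String) (out : Option (Int × Int)) : Prop := out = compare_rows_smudge_alt row1 row2
instance (row1 : String) (row2 : String) (out : Option (Int × Int)) : Decidable (Spec_compare_rows_smudge row1 row2 out) := by unfold Spec_compare_rows_smudge; infer_instance

-- ===== CLAIM (what is proved, stated in full; the proofs are below) =====
def Claim_equal_compare_rows_smudge : Prop := ∀ (row1 : String) (row2 : String), Dom_compare_rows_smudge row1 row2 → Pre_compare_rows_smudge row1 row2 → Spec_compare_rows_smudge row1 row2 (compare_rows_smudge row1 row2)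

-- ===== LEMMAS AND PROOFS =====

-- A's foldl, for any mismatch test p and whichRow function w, computes the length and
-- last element of the filtered index list.
theorem pv_foldl_mismatch (p : Int → Bool) (w : Int → Int) (xs : List Int)
    (s : Int × Option Int × Option Int) :
    xs.foldl (fun s i => if p i then (s.1 + 1, some i, some (w i)) else s) s =
      match (xs.filter p).getLast? with
      | none => s
      | some j => (s.1 + (xs.filter p).length, some j, some (w j)) := by
  induction xs generalizing s with
  | nil => simp
  | cons x xs ih =>
    simp only [List.foldl_cons, List.filter_cons]
    by_cases hx : p x
    · rw [if_pos hx, if_pos hx, ih]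
      cases hlast : (xs.filter p).getLast? with
      | none =>
        have hfil : xs.filter p = [] := List.getLast?_eq_none_iff.mp hlast
        rw [hfil]; simp
      | some j =>
        have hne : xs.filter p ≠ [] := by
          intro h; rw [h] at hlast; simp at hlast
        have hcons : (x :: xs.filter p).getLast? = some j := by
          cases h : xs.filter p with
          | nil => exact absurd h hne
          | cons a l =>
            rw [h] at hlast
            rw [List.getLast?_cons_cons]; exact hlast
        rw [hcons]
        simp only [List.length_cons]
        congr 1
        push_cast
        ring
    · rw [if_neg hx, if_neg hx, ih]

-- A's decide-from-state equals the match on the gathered mismatch list.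
theorem pv_gen (p : Int → Bool) (w : Int → Int) (xs : List Int) :
    (let st := xs.foldl (fun s i => if p i then (s.1 + 1, some i, some (w i)) else s)
        ((0 : Int), (none : Option Int), (none : Option Int));
     if st.1 = 1 then
       match st.2.1, st.2.2 with
       | some d, some v => some (d, v)
       | _, _ => none
     else none) =
    (match xs.filter p with
     | [i] => some (i, w i)
     | _ => (none : Option (Int × Int))) := by
  simp only [pv_foldl_mismatch]
  cases hm : xs.filter p with
  | nil => simp
  | cons j rest =>
    cases rest with
    | nil => simp [List.getLast?_singleton]
    | cons k rest' =>
      obtain ⟨m, hm2⟩ := Option.isSome_iff_exists.mp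
        (List.getLast?_isSome.mpr (by simp : (j :: k :: rest') ≠ []))
      rw [hm2]
      have h1 : ¬ ((0 : Int) + (((j :: k :: rest').length : Nat) : Int) = 1) := by
        simp only [List.length_cons]; push_cast; omega
      rw [if_neg h1]

-- csFind returns the first mismatch index in [i, n), or n if there is none.
theorem csFind_spec (l1 l2 : List Char) (n : Int) (i : Int) (hin : i ≤ n) :
    let p : Int → Bool := fun j => (PySem.List.pyGet? l1 j).getD ' ' != (PySem.List.pyGet? l2 j).getD ' '
    csFind l1 l2 n i =
      match (PySem.List.pyRange i n 1).filter p with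
      | [] => n
      | j :: _ => j := by
  intro p
  induction hni : (n - i).toNat generalizing i with
  | zero =>
    have : ¬ i < n := by omega
    rw [csFind, dif_neg this, PySem.List.pyRange_one_eq_nil (by omega)]
    simp; omega
  | succ m ih =>
    have hlt : i < n := by omega
    rw [csFind, dif_pos hlt, PySem.List.pyRange_one_cons hlt, List.filter_cons]
    by_cases hp : p i
    · have : ¬ ((PySem.List.pyGet? l1 i).getD ' ' == (PySem.List.pyGet? l2 i).getD ' ') = true := by
        simp only [p, bne_iff_ne, ne_eq] at hp
        simp [hp]
      rw [if_neg this]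
      simp only [p] at hp
      rw [if_pos hp]
    · have heq : ((PySem.List.pyGet? l1 i).getD ' ' == (PySem.List.pyGet? l2 i).getD ' ') = true := by
        simp only [p, bne_iff_ne, ne_eq, not_not] at hp
        simp [hp]
      rw [if_pos heq]
      have hp' : ¬ (p i = true) := hp
      simp only [p] at hp'
      rw [if_neg hp']
      exact ih (i + 1) (by omega) (by omega)

-- With row2 at least as long as row1, the suffix slices from k+1 agree exactly when
-- no mismatch index lies in (k, n).
theorem slice_eq_iff_no_mismatch (l1 l2 : List Char) (hlen : l1.length ≤ l2.length)
    (k : Nat) (hk : k < l1.length) :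
    let n : Int := l1.length
    let p : Int → Bool := fun j => (PySem.List.pyGet? l1 j).getD ' ' != (PySem.List.pyGet? l2 j).getD ' '
    (PySem.List.slice l1 (some ((k : Int) + 1)) (some n) = PySem.List.slice l2 (some ((k : Int) + 1)) (some n))
      ↔ (PySem.List.pyRange ((k : Int) + 1) n 1).filter p = [] := by
  intro n p
  have hcast : ((k : Int) + 1) = ((k + 1 : Nat) : Int) := by push_cast; ring
  have hn : n = ((l1.length : Nat) : Int) := rfl
  rw [hcast, hn, PySem.List.slice_natCast, PySem.List.slice_natCast]
  constructor
  · intro hsl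
    rw [List.filter_eq_nil_iff]
    intro j hj
    rw [PySem.List.mem_pyRange_one] at hj
    have hj0 : 0 ≤ j := by omega
    have hjlt : j.toNat < l1.length := by omega
    have hjk : k + 1 ≤ j.toNat := by omega
    simp only [p, bne_iff_ne, ne_eq, not_not]
    have h1 : PySem.List.pyGet? l1 j = some l1[j.toNat] :=
      PySem.List.pyGet?_eq_some_getElem l1 hj0 (by omega)
    have h2 : PySem.List.pyGet? l2 j = some (l2[j.toNat]'(by omega)) :=
      PySem.List.pyGet?_eq_some_getElem l2 hj0 (by omega)
    rw [h1, h2]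
    simp only [Option.getD_some]
    -- read position j.toNat of both slices
    have hidx : j.toNat - (k+1) < l1.length - (k+1) := by omega
    have := congrArg (fun xs => xs[j.toNat - (k+1)]?) hsl
    simp only [List.getElem?_take, List.getElem?_drop] at this
    have harith : k + 1 + (j.toNat - (k+1)) = j.toNat := by omega
    rw [harith] at this
    simp only [hidx, if_pos] at this
    have e1 : l1[j.toNat]? = some l1[j.toNat] := List.getElem?_eq_getElem hjlt
    have e2 : l2[j.toNat]? = some (l2[j.toNat]'(by omega)) := List.getElem?_eq_getElem (by omega)
    rw [e1, e2] at this
    exact Option.some.inj this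
  · intro hfil
    apply List.ext_getElem?
    intro m
    by_cases hm : m < l1.length - (k+1)
    · simp only [List.getElem?_take, hm, if_pos, List.getElem?_drop]
      have hmem : ((k : Int) + 1 + m) ∈ PySem.List.pyRange ((k:Int)+1) n 1 := by
        rw [PySem.List.mem_pyRange_one]
        constructor
        · omega
        · simp only [n]; push_cast; omega
      have hnp := List.filter_eq_nil_iff.mp hfil _ hmem
      simp only [p, bne_iff_ne, ne_eq, not_not] at hnp
      have hj0 : (0:Int) ≤ (k:Int) + 1 + m := by omega
      have hcast2 : ((k : Int) + 1 + m) = (((k + 1 + m : Nat)) : Int) := by omega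
      have hjlt : k + 1 + m < l1.length := by omega
      have h1 : PySem.List.pyGet? l1 ((k:Int)+1+m) = some (l1[k+1+m]'hjlt) := by
        rw [hcast2]; exact PySem.List.pyGet?_eq_some_getElem l1 (by positivity) (by omega)
      have h2 : PySem.List.pyGet? l2 ((k:Int)+1+m) = some (l2[k+1+m]'(by omega)) := by
        rw [hcast2]; exact PySem.List.pyGet?_eq_some_getElem l2 (by positivity) (by omega)
      rw [h1, h2] at hnp
      simp only [Option.getD_some] at hnp
      rw [List.getElem?_eq_getElem (by omega), List.getElem?_eq_getElem (by omega)]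
      exact congrArg some hnp
    · have e1 : ((l1.drop (k+1)).take (l1.length - (k+1)))[m]? = none := by
        apply List.getElem?_eq_none; simp; omega
      have e2 : ((l2.drop (k+1)).take (l1.length - (k+1)))[m]? = none := by
        apply List.getElem?_eq_none; simp; omega
      rw [e1, e2]

-- The two ports agree whenever row2 is at least as long as row1.
theorem compare_rows_smudge_eq (row1 row2 : String)
    (hpre : row1.toList.length ≤ row2.toList.length) :
    compare_rows_smudge row1 row2 = compare_rows_smudge_alt row1 row2 := by
  set l1 := row1.toList with hl1
  set l2 := row2.toList with hl2
  set n : Int := (l1.length : Int) with hn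
  set p : Int → Bool := fun j => (PySem.List.pyGet? l1 j).getD ' ' != (PySem.List.pyGet? l2 j).getD ' ' with hp
  set w : Int → Int := fun j => if (PySem.List.pyGet? l1 j).getD ' ' == '.' then (1 : Int) else 2 with hw
  have hA : compare_rows_smudge row1 row2 =
      (match (PySem.List.pyRange 0 n 1).filter p with
       | [i] => some (i, w i)
       | _ => (none : Option (Int × Int))) := pv_gen p w _
  rw [hA]
  show _ = compare_rows_smudge_alt row1 row2
  unfold compare_rows_smudge_alt
  simp only [← hl1, ← hl2, ← hn]
  have hfind := csFind_spec l1 l2 n 0 (by positivity)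
  simp only at hfind
  -- split the full range at the first-mismatch point
  cases hM : (PySem.List.pyRange 0 n 1).filter p with
  | nil =>
    have : csFind l1 l2 n 0 = n := by rw [hfind, hM]
    rw [this, if_pos rfl]
  | cons j rest =>
    -- j is the head of the filtered range: 0 ≤ j < n, p j, and no mismatch below j
    have hjmem : j ∈ PySem.List.pyRange 0 n 1 := by
      have : j ∈ (PySem.List.pyRange 0 n 1).filter p := by rw [hM]; simp
      exact List.mem_of_mem_filter this
    rw [PySem.List.mem_pyRange_one] at hjmem
    obtain ⟨hj0, hjn⟩ := hjmem
    have hsplit : PySem.List.pyRange 0 n 1 =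
        PySem.List.pyRange 0 j 1 ++ PySem.List.pyRange j n 1 :=
      PySem.List.pyRange_one_append 0 j n hj0 (le_of_lt hjn)
    have hlow : (PySem.List.pyRange 0 j 1).filter p = [] := by
      -- the head of 'filter p (range 0 n)' is j; any p-element below j would precede it
      by_contra hne
      cases hlow' : (PySem.List.pyRange 0 j 1).filter p with
      | nil => exact hne hlow'
      | cons a tl =>
        have : (PySem.List.pyRange 0 n 1).filter p = (a :: tl) ++ (PySem.List.pyRange j n 1).filter p := by
          rw [hsplit, List.filter_append, hlow']
        rw [hM] at this
        have haj : a = j := by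
          have := congrArg List.head? this
          simp at this
          exact this.symm
        have hamem : a ∈ (PySem.List.pyRange 0 j 1).filter p := by rw [hlow']; simp
        have := List.mem_of_mem_filter hamem
        rw [PySem.List.mem_pyRange_one] at this
        omega
    have hup : (PySem.List.pyRange j n 1).filter p = j :: rest := by
      have : (PySem.List.pyRange 0 n 1).filter p = (PySem.List.pyRange j n 1).filter p := by
        rw [hsplit, List.filter_append, hlow]; simp
      rw [← this, hM]
    have hpj : p j := by
      have : j ∈ (PySem.List.pyRange j n 1).filter p := by rw [hup]; simp
      exact (List.mem_filter.mp this).2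
    have hrest : (PySem.List.pyRange (j+1) n 1).filter p = rest := by
      have := hup
      rw [PySem.List.pyRange_one_cons hjn, List.filter_cons, if_pos hpj] at this
      exact List.cons.inj this |>.2
    have hfj : csFind l1 l2 n 0 = j := by
      rw [hfind]
      have : (PySem.List.pyRange 0 n 1).filter p = j :: rest := hM
      rw [this]
    rw [hfj, if_neg (by omega : ¬ j = n)]
    -- slice comparison decides whether rest is empty
    have hkn : j.toNat < l1.length := by omega
    have hjcast : j = ((j.toNat : Nat) : Int) := by omega
    have hslice := slice_eq_iff_no_mismatch l1 l2 hpre j.toNat hkn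
    simp only [← hn, ← hp] at hslice
    rw [hjcast] at hrest ⊢
    cases rest with
    | nil =>
      have hse : PySem.List.slice l1 (some ((j.toNat : Int) + 1)) (some n) =
          PySem.List.slice l2 (some ((j.toNat : Int) + 1)) (some n) := hslice.mpr hrest
      rw [if_neg (by exact fun h => h hse)]
    | cons b tl =>
      have hsne : PySem.List.slice l1 (some ((j.toNat : Int) + 1)) (some n) ≠
          PySem.List.slice l2 (some ((j.toNat : Int) + 1)) (some n) := by
        intro hse
        have := hslice.mp hse
        rw [hrest] at this
        exact List.cons_ne_nil _ _ this
      rw [if_pos hsne]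

-- ===== VERDICT (by name: the statement is the Claim_ definition above) =====
theorem compare_rows_smudge_spec : Claim_equal_compare_rows_smudge := by
  intro row1 row2 _ hpre
  unfold Spec_compare_rows_smudge
  exact compare_rows_smudge_eq row1 row2 hpre
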